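-- pv_equiv track=rewrite | github.com/nithinj25/drug-repurposing-api | verify_real_data.py | check_if_mock_data
-- ===== SOURCE A (Python) =====
-- def check_if_mock_data(text):
--     """Check for common mock data indicators"""
--     mock_indicators = [
--         'mock', 'Mock', 'MOCK',
--         'example', 'Example', 'EXAMPLE',
--         'dummy', 'Dummy', 'DUMMY',
--         'test', 'Test', 'placeholder',
--         'lorem ipsum', 'sample data'
--     ]
--     return any(indicator in str(text) for indicator in mock_indicators)
-- ===== SOURCE B (Python) =====
-- MOCK_INDICATORS = [
--     'mock', 'Mock', 'MOCK',
--     'example', 'Example', 'EXAMPLE',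
--     'dummy', 'Dummy', 'DUMMY',
--     'test', 'Test', 'placeholder',
--     'lorem ipsum', 'sample data'
-- ]
--
--
-- def _match_here(t):
--     """Does some indicator start exactly at the head of t?"""
--     for ind in MOCK_INDICATORS:
--         if t[:len(ind)] == ind:
--             return True
--     return False
--
--
-- def check_if_mock_data(text):
--     """Check for common mock data indicators"""
--     t = str(text)
--     while True:
--         if _match_here(t):
--             return True
--         if not t:
--             return False
--         t = t[1:]
-- ===== Notes on version B (the rewrite author's own statement) =====
-- stated objective: alternative
-- what changed: Replaces any() over per-indicator substring scans with an explicit while-loop that slides a window over the text and, via a helper, tests each indicator as a literal prefix of the current suffix by slice comparison.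
import Mathlib
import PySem

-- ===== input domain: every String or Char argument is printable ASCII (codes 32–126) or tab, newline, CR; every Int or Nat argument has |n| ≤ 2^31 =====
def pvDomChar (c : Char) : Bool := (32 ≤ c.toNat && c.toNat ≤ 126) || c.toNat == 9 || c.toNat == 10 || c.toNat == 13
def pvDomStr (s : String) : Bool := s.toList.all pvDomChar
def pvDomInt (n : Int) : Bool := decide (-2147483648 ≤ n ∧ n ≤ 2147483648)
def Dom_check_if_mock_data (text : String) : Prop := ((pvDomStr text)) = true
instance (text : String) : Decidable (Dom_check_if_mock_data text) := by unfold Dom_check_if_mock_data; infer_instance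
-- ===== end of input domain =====

-- B replaces A's any() of independent substring scans by an explicit sliding-window
-- loop that tests each indicator as a slice-equality prefix of the current suffix
-- (alternative decomposition, same results).

-- ===== PORT A =====
-- the literal indicator list A contains
def mock_indicators : List String :=
  ["mock", "Mock", "MOCK",
   "example", "Example", "EXAMPLE",
   "dummy", "Dummy", "DUMMY",
   "test", "Test", "placeholder",
   "lorem ipsum", "sample data"]

-- any(indicator in str(text) for indicator in mock_indicators)
def check_if_mock_data (text : String) : Bool :=
  mock_indicators.any (fun ind => PySem.Str.isIn ind text)

-- ===== PORT B =====
-- B's indicator list as character lists (Source B compares slices of the text)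
def mockPatterns : List (List Char) :=
  [['m','o','c','k'], ['M','o','c','k'], ['M','O','C','K'],
   ['e','x','a','m','p','l','e'], ['E','x','a','m','p','l','e'], ['E','X','A','M','P','L','E'],
   ['d','u','m','m','y'], ['D','u','m','m','y'], ['D','U','M','M','Y'],
   ['t','e','s','t'], ['T','e','s','t'],
   ['p','l','a','c','e','h','o','l','d','e','r'],
   ['l','o','r','e','m',' ','i','p','s','u','m'],
   ['s','a','m','p','l','e',' ','d','a','t','a']]

-- _match_here: walk the indicator list, compare t[:len(ind)] == ind
def matchHere : List (List Char) → List Char → Bool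
  | [], _ => false
  | p :: ps, t => if t.take p.length = p then true else matchHere ps t

-- the while-loop of Source B: check here, stop on empty, else drop one char
def slideScan : List Char → Bool
  | [] => matchHere mockPatterns []
  | c :: rest =>
      if matchHere mockPatterns (c :: rest) then true else slideScan rest

def check_if_mock_data_alt (text : String) : Bool :=
  slideScan text.toList

-- ===== PRECONDITION & SPEC =====
def Spec_check_if_mock_data (text : String) (out : Bool) : Prop := out = check_if_mock_data_alt text
instance (text : String) (out : Bool) : Decidable (Spec_check_if_mock_data text out) := by unfold Spec_check_if_mock_data; infer_instance

-- ===== CLAIM =====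
def Claim_equal_check_if_mock_data : Prop := ∀ (text : String), Dom_check_if_mock_data text → Spec_check_if_mock_data text (check_if_mock_data text)

-- ===== LEMMAS AND PROOFS =====

theorem matchHere_iff (ps : List (List Char)) (t : List Char) :
    matchHere ps t = true ↔ ∃ p ∈ ps, p <+: t := by
  induction ps with
  | nil => simp [matchHere]
  | cons p ps ih =>
      simp only [matchHere]
      split_ifs with h
      · simp only [true_iff]
        exact ⟨p, List.mem_cons_self, by rw [List.prefix_iff_eq_take]; exact h.symm⟩
      · rw [ih]
        constructor
        · rintro ⟨q, hq, hpre⟩; exact ⟨q, List.mem_cons_of_mem _ hq, hpre⟩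
        · rintro ⟨q, hq, hpre⟩
          rcases List.mem_cons.mp hq with rfl | hq'
          · exact absurd ((List.prefix_iff_eq_take.mp hpre).symm) h
          · exact ⟨q, hq', hpre⟩

theorem slideScan_iff (t : List Char) :
    slideScan t = true ↔ ∃ i, ∃ p ∈ mockPatterns, p <+: t.drop i := by
  induction t with
  | nil =>
      simp only [slideScan, List.drop_nil, matchHere_iff]
      constructor
      · rintro h; exact ⟨0, h⟩
      · rintro ⟨_, h⟩; exact h
  | cons c rest ih =>
      simp only [slideScan]
      split_ifs with h
      · refine ⟨fun _ => ⟨0, ?_⟩, fun _ => rfl⟩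
        simpa using (matchHere_iff _ _).mp h
      · rw [ih]
        constructor
        · rintro ⟨i, p, hp, hpre⟩
          exact ⟨i + 1, p, hp, by simpa using hpre⟩
        · rintro ⟨i, p, hp, hpre⟩
          cases i with
          | zero => exact absurd ((matchHere_iff _ _).mpr ⟨p, hp, by simpa using hpre⟩) h
          | succ j => exact ⟨j, p, hp, by simpa using hpre⟩

theorem mockPatterns_eq : mockPatterns = mock_indicators.map String.toList := by decide

-- ===== VERDICT =====
theorem check_if_mock_data_spec : Claim_equal_check_if_mock_data := by
  intro text _
  unfold Spec_check_if_mock_data check_if_mock_data check_if_mock_data_alt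
  rw [Bool.eq_iff_iff, slideScan_iff]
  simp only [List.any_eq_true, mockPatterns_eq, List.mem_map]
  constructor
  · rintro ⟨ind, hmem, hin⟩
    obtain ⟨j, hj⟩ := (PySem.Chars.exists_prefix_drop_iff_isIn ind.toList text.toList).mpr
      (by simpa [PySem.Str.isIn] using hin)
    exact ⟨j, ind.toList, ⟨ind, hmem, rfl⟩, hj⟩
  · rintro ⟨i, p, ⟨ind, hmem, rfl⟩, hpre⟩
    refine ⟨ind, hmem, ?_⟩
    have := (PySem.Chars.exists_prefix_drop_iff_isIn ind.toList text.toList).mp ⟨i, hpre⟩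
    simpa [PySem.Str.isIn] using this
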